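-- pv_equiv track=rewrite | github.com/MichalPawelek123/python-exercises | tic_tac_toe.py | check_draw
-- ===== SOURCE A (Python) =====
-- def check_draw(board):
--     fields = [17, 21, 25, 46, 50, 54, 75, 79, 83]
--     check_fields = []
--     for i, field in enumerate(board):
--         if i in fields and board[i] in ['X', 'O']:
--             check_fields.append(field)
--
--     if len(check_fields) == 9:
--         return True
--     else:
--         return False
-- ===== SOURCE B (Python) =====
-- def check_draw(board):
--     fields = [17, 21, 25, 46, 50, 54, 75, 79, 83]
--     return all(f < len(board) and board[f] in ('X', 'O') for f in fields)
-- ===== Notes on version B (the rewrite author's own statement) =====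
-- stated objective: idiomatic
-- what changed: Instead of scanning the whole board with enumerate and collecting matches of a membership test into a list whose length is compared to 9, B iterates directly over the nine target indices and checks each cell with a bounds guard, via all().
import Mathlib
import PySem

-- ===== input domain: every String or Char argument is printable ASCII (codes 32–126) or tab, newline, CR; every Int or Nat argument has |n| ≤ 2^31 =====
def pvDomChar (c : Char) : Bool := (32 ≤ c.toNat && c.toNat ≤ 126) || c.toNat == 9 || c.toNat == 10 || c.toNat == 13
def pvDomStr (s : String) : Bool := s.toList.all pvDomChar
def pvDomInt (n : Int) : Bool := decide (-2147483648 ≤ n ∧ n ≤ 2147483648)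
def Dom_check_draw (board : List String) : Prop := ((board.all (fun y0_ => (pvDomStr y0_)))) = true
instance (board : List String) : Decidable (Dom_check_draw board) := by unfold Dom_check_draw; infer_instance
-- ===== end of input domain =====

-- B iterates over the nine field indices with a bounds guard instead of scanning the board; idiomatic.

-- the nine field indices (local list `fields` in both Pythons)
def pvFields : List Int := [17, 21, 25, 46, 50, 54, 75, 79, 83]

-- ===== PORT A =====
-- `board[i]` with i from enumerate is always in range, so pyGetD with default "" is exact
def check_draw (board : List String) : Bool :=
  let check_fields : List String :=
    (PySem.List.enumerate board).foldl
      (fun acc p =>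
        if p.1 ∈ pvFields ∧ PySem.List.pyGetD board p.1 "" ∈ (["X", "O"] : List String)
        then acc ++ [p.2] else acc) []
  if check_fields.length == 9 then true else false

-- ===== PORT B =====
-- `board[f]` is only reached after the `f < len(board)` guard, so pyGetD with default "" is exact
def check_draw_alt (board : List String) : Bool :=
  pvFields.all (fun f =>
    decide (f < (board.length : Int)) &&
    decide (PySem.List.pyGetD board f "" ∈ (["X", "O"] : List String)))

-- ===== PRECONDITION & SPEC =====
def Spec_check_draw (board : List String) (out : Bool) : Prop := out = check_draw_alt board
instance (board : List String) (out : Bool) : Decidable (Spec_check_draw board out) := by unfold Spec_check_draw; infer_instance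

-- ===== CLAIM (what is proved, stated in full; the proofs are below) =====
def Claim_equal_check_draw : Prop := ∀ (board : List String), Dom_check_draw board → Spec_check_draw board (check_draw board)

-- ===== LEMMAS AND PROOFS =====

theorem pv_countP_or_disjoint {α : Type} (a b : α → Bool) :
    ∀ (l : List α), (∀ x, ¬(a x = true ∧ b x = true)) →
      l.countP (fun x => a x || b x) = l.countP a + l.countP b := by
  intro l h
  induction l with
  | nil => simp
  | cons x xs ih =>
    simp only [List.countP_cons]
    rcases ha : a x <;> rcases hb : b x <;> simp_all <;> omega

theorem pv_countP_beq {α : Type} [DecidableEq α] (f : α) (q : α → Bool)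
    (l : List α) (hl : l.Nodup) :
    l.countP (fun x => (x == f) && q x) = if f ∈ l ∧ q f = true then 1 else 0 := by
  rcases hq : q f with _ | _
  · rw [List.countP_eq_zero.2]
    · simp
    · intro x hx
      rcases hb : (x == f) with _ | _
      · simp
      · have : x = f := by simpa using hb
        subst this; simp [hq]
  · have hcongr : l.countP (fun x => (x == f) && q x) = l.countP (fun x => x == f) := by
      apply List.countP_congr
      intro x hx
      rcases hb : (x == f) with _ | _
      · simp
      · have : x = f := by simpa using hb
        subst this; simp [hq]
    rw [hcongr]
    by_cases hm : f ∈ l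
    · have := List.count_eq_one_of_mem hl hm
      simpa [List.count, hq, hm] using this
    · have := List.count_eq_zero_of_not_mem (l := l) (a := f) hm
      simpa [List.count, hq, hm] using this

theorem pv_countP_mem_swap (q : Int → Bool) :
    ∀ (fl R : List Int), fl.Nodup → R.Nodup →
      R.countP (fun j => decide (j ∈ fl) && q j) =
      fl.countP (fun f => decide (f ∈ R) && q f) := by
  intro fl
  induction fl with
  | nil => intro R _ _; simp
  | cons f fl ih =>
    intro R hfl hR
    have hnotin : f ∉ fl := by simp [List.nodup_cons] at hfl; exact hfl.1
    have hfl' : fl.Nodup := by simp [List.nodup_cons] at hfl; exact hfl.2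
    have hsplit : R.countP (fun j => decide (j ∈ f :: fl) && q j) =
        R.countP (fun j => (j == f) && q j) +
        R.countP (fun j => decide (j ∈ fl) && q j) := by
      rw [← pv_countP_or_disjoint (fun j => (j == f) && q j)
            (fun j => decide (j ∈ fl) && q j) R]
      · apply List.countP_congr
        intro j _
        simp only [List.mem_cons]
        rcases hj : (j == f) with _ | _ <;> simp_all
      · intro j hj2
        rcases hj2 with ⟨h1, h2⟩
        have : j = f := by simpa using (Bool.and_elim_left h1)
        subst this
        have : j ∈ fl := by simpa using (Bool.and_elim_left h2)
        exact hnotin this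
    rw [hsplit, pv_countP_beq f q R hR, ih R hfl' hR, List.countP_cons]
    by_cases hm : f ∈ R <;> rcases hq : q f <;> (simp [hm]; try omega)

theorem pv_pyRange_nodup (n : Int) : (PySem.List.pyRange 0 n 1).Nodup := by
  rw [PySem.List.pyRange_one]
  apply List.Nodup.map
  · intro a b h; simp only [add_right_inj] at h; exact_mod_cast h
  · exact List.nodup_range

theorem check_draw_eq (board : List String) :
    check_draw board = check_draw_alt board := by
  rw [Bool.eq_iff_iff]
  unfold check_draw check_draw_alt
  rw [PySem.List.foldl_append_ite
        (p := fun p : Int × String =>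
          p.1 ∈ pvFields ∧ PySem.List.pyGetD board p.1 "" ∈ (["X", "O"] : List String))
        (f := fun p : Int × String => p.2)]
  simp only [List.nil_append, List.length_map, ← List.countP_eq_length_filter]
  rw [PySem.List.enumerate_eq_map_pyRange (d := "")]
  rw [List.countP_map]
  have hc : ((fun p : Int × String =>
        decide (p.1 ∈ pvFields ∧ PySem.List.pyGetD board p.1 "" ∈ (["X", "O"] : List String))) ∘
        (fun j => (j, PySem.List.pyGetD board j ""))) =
      (fun j => decide (j ∈ pvFields) &&
        decide (PySem.List.pyGetD board j "" ∈ (["X", "O"] : List String))) := by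
    funext j; simp [Bool.decide_and]
  rw [hc]
  simp only [PySem.List.len_eq]
  simp only [beq_iff_eq]
  have hif : ∀ (P : Prop) (inst : Decidable P), ((if P then true else false) = true) ↔ P := by
    intro P inst; split <;> simp_all
  rw [hif _ _]
  rw [pv_countP_mem_swap
        (fun j => decide (PySem.List.pyGetD board j "" ∈ (["X", "O"] : List String)))
        pvFields (PySem.List.pyRange 0 (board.length : Int) 1)
        (by decide) (pv_pyRange_nodup _)]
  have hlen : pvFields.length = 9 := by decide
  constructor
  · intro h
    rw [List.all_eq_true]
    have h9 : List.countP (fun f => decide (f ∈ PySem.List.pyRange 0 ((board.length : Int)) 1) &&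
        decide (PySem.List.pyGetD board f "" ∈ (["X", "O"] : List String))) pvFields = pvFields.length := by
      rw [hlen]; exact h
    intro f hf
    have := (List.countP_eq_length.1 h9) f hf
    have hpos : (0:Int) ≤ f := by
      simp [pvFields] at hf; omega
    simp only [PySem.List.mem_pyRange_one, Bool.and_eq_true, decide_eq_true_eq] at this ⊢
    exact ⟨this.1.2, this.2⟩
  · intro h
    have hall : ∀ f ∈ pvFields, (decide (f ∈ PySem.List.pyRange 0 (board.length : Int) 1) &&
        decide (PySem.List.pyGetD board f "" ∈ (["X", "O"] : List String))) = true := by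
      intro f hf
      have := (List.all_eq_true.1 h) f hf
      have hpos : (0:Int) ≤ f := by
        simp [pvFields] at hf; omega
      simp only [PySem.List.mem_pyRange_one, Bool.and_eq_true, decide_eq_true_eq] at this ⊢
      exact ⟨⟨hpos, this.1⟩, this.2⟩
    have := List.countP_eq_length.2 hall
    rw [this, hlen]

-- ===== VERDICT (by name: the statement is the Claim_ definition above) =====
theorem check_draw_spec : Claim_equal_check_draw := by
  intro board _
  unfold Spec_check_draw
  exact check_draw_eq board
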